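-- pv_equiv track=rewrite | github.com/syhAnna/independent_research | hw3/python/overall_plot.py | remove_trailing_zero
-- ===== SOURCE A (Python) =====
-- def remove_trailing_zero(l):
--     index = 0
--     for i in range(len(l)):
--         if l[index:] == [0] * (len(l) - i):
--             break
--         else:
--             index += 1
--     return index
-- ===== SOURCE B (Python) =====
-- def remove_trailing_zero(l):
--     # O(n): strip zeros from the end; return length of the remaining prefix.
--     n = len(l)
--     while n > 0 and l[n - 1] == 0:
--         n -= 1
--     return n
-- ===== Notes on version B (the rewrite author's own statement) =====
-- stated objective: faster
-- what changed: Replace the forward loop that compares each suffix slice against a freshly built zero list with a single backwards scan that decrements the length while the last element is zero.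
import Mathlib
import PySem

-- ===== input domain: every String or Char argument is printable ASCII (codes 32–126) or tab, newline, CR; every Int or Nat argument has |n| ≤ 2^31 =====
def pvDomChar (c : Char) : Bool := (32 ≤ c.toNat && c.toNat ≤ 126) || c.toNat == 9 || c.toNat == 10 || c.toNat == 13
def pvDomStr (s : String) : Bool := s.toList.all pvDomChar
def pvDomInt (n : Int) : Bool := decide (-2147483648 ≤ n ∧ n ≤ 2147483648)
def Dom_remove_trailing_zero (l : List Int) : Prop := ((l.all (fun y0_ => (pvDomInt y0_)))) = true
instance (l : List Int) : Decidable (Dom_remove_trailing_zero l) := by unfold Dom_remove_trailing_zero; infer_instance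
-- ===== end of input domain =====

-- B replaces A's quadratic suffix-slice comparisons with one backwards scan (objective: faster).

-- ===== PORT A =====
-- 'for i in range(len(l))' with break; state = index.  l[index:] -> PySem.List.slice.
def pvLoopA (l : List Int) : List Nat → Int → Int
  | [], index => index
  | i :: rest, index =>
      if PySem.List.slice l (some index) none = List.replicate (l.length - i) (0 : Int) then
        index                                      -- break
      else
        pvLoopA l rest (index + 1)

def remove_trailing_zero (l : List Int) : Int :=
  pvLoopA l (List.range l.length) 0

-- ===== PORT B =====
-- 'while n > 0 and l[n-1] == 0: n -= 1'; the index n-1 is always in range, so l.getD is exact here.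
def pvTrimB (l : List Int) : Nat → Nat
  | 0 => 0
  | n + 1 => if l.getD n 0 = 0 then pvTrimB l n else n + 1

def remove_trailing_zero_alt (l : List Int) : Int :=
  (pvTrimB l l.length : Int)

-- ===== PRECONDITION & SPEC =====
def Spec_remove_trailing_zero (l : List Int) (out : Int) : Prop := out = remove_trailing_zero_alt l
instance (l : List Int) (out : Int) : Decidable (Spec_remove_trailing_zero l out) := by unfold Spec_remove_trailing_zero; infer_instance

-- ===== CLAIM (what is proved, stated in full; the proofs are below) =====
def Claim_equal_remove_trailing_zero : Prop := ∀ (l : List Int), Dom_remove_trailing_zero l → Spec_remove_trailing_zero l (remove_trailing_zero l)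

-- ===== LEMMAS AND PROOFS =====

-- start of the all-zero suffix (least j with drop j all zero); both ports compute it
def pvZidx : List Int → Nat
  | [] => 0
  | x :: xs => if (x :: xs).all (fun y => y == 0) then 0 else 1 + pvZidx xs

theorem pvZidx_of_all {xs : List Int} (h : xs.all (fun y => y == 0) = true) : pvZidx xs = 0 := by
  cases xs with
  | nil => rfl
  | cons x xs => simp [pvZidx, h]

theorem pvZidx_append_zero (xs : List Int) : pvZidx (xs ++ [0]) = pvZidx xs := by
  induction xs with
  | nil => rfl
  | cons x xs ih =>
    simp only [List.cons_append, pvZidx, List.all_cons, List.all_append, ih]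
    simp

theorem pvZidx_append_nonzero (xs : List Int) {c : Int} (hc : c ≠ 0) :
    pvZidx (xs ++ [c]) = xs.length + 1 := by
  induction xs with
  | nil => simp [pvZidx, hc]
  | cons x xs ih =>
    have : ((x :: xs ++ [c]).all (fun y => y == 0)) = false := by
      simp [List.all_append, hc]
    simp only [List.cons_append] at this ⊢
    simp [pvZidx, this, ih]
    omega

theorem pvLoopA_eq (l : List Int) :
    ∀ n i, i + n = l.length →
      pvLoopA l (List.range' i n) (i : Int) = (i : Int) + (pvZidx (l.drop i) : Int) := by
  intro n
  induction n with
  | zero =>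
    intro i hi
    have : l.drop i = [] := by
      apply List.drop_eq_nil_of_le; omega
    simp [pvLoopA, this, pvZidx]
  | succ n ih =>
    intro i hi
    have hilt : i < l.length := by omega
    have hslice : PySem.List.slice l (some (i : Int)) none = l.drop i :=
      PySem.List.slice_from_natCast l i
    have hlen : (l.drop i).length = l.length - i := by simp
    have hdropcons : l.drop i = l[i] :: l.drop (i + 1) := (List.getElem_cons_drop hilt).symm
    rw [List.range'_succ]
    simp only [pvLoopA, hslice]
    by_cases hrep : l.drop i = List.replicate (l.length - i) (0 : Int)
    · rw [if_pos hrep]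
      have hall : (l.drop i).all (fun y => y == 0) = true := by
        rw [hrep]; simp
      rw [pvZidx_of_all hall]; simp
    · rw [if_neg hrep]
      have hall : ¬ ((l.drop i).all (fun y => y == 0) = true) := by
        intro hall
        apply hrep
        rw [List.eq_replicate_iff]
        refine ⟨hlen, ?_⟩
        intro b hb
        have := List.all_eq_true.mp hall b hb
        simpa using this
      have hz : pvZidx (l.drop i) = 1 + pvZidx (l.drop (i + 1)) := by
        rw [hdropcons]
        rw [pvZidx, if_neg (by rw [← hdropcons]; simpa using hall)]
      rw [hz]
      have := ih (i + 1) (by omega)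
      push_cast at this ⊢
      rw [this]
      ring

theorem pvTrimB_eq (l : List Int) : ∀ n, n ≤ l.length → pvTrimB l n = pvZidx (l.take n) := by
  intro n
  induction n with
  | zero => intro _; rfl
  | succ n ih =>
    intro hn
    have hlt : n < l.length := by omega
    have htake : l.take (n + 1) = l.take n ++ [l[n]] := List.take_succ_eq_append_getElem hlt
    have hget : l.getD n 0 = l[n] := by
      simp [List.getD, List.getElem?_eq_getElem hlt]
    rw [pvTrimB, hget, htake]
    by_cases h0 : l[n] = 0
    · rw [if_pos h0, h0, pvZidx_append_zero, ih (by omega)]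
    · rw [if_neg h0, pvZidx_append_nonzero _ h0]
      simp; omega

-- ===== VERDICT (by name: the statement is the Claim_ definition above) =====
theorem remove_trailing_zero_spec : Claim_equal_remove_trailing_zero := by
  intro l _
  unfold Spec_remove_trailing_zero remove_trailing_zero remove_trailing_zero_alt
  rw [List.range_eq_range']
  have ha := pvLoopA_eq l l.length 0 (by omega)
  simp only [Nat.cast_zero, List.drop_zero, zero_add] at ha
  rw [ha, pvTrimB_eq l l.length (le_refl _), List.take_length]
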